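-- pv_equiv track=rewrite | github.com/manishmania20/assignment | file.py | small_substring_calculate
-- ===== SOURCE A (Python) =====
-- def find_distinct_chars(string,n):
--     k=set(string[0:n])
--     k=str(k)
--     length=len(k)
--     return length
--
-- def small_substring_calculate(string):
--     n=len(string)
--     max_distinct_chars=find_distinct_chars(string,n)
--     res=n
--     for i in range(n):
--         for j in range(n):
--             substring=string[i:j]
--             substring_length=len(substring)
--             susbstring_distinct_chars=find_distinct_chars(substring,substring_length)
--
--             if(substring_length<res and max_distinct_chars==susbstring_distinct_chars):
--                 res=substring_length
--     return res
-- ===== SOURCE B (Python) =====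
-- def small_substring_calculate(string):
--     n = len(string)
--     distinct = len(set(string))
--     best = n
--     for i in range(n):
--         seen = set()
--         for j in range(i, n):
--             seen.add(string[j])
--             if len(seen) == distinct:
--                 best = min(best, j - i + 1)
--                 break
--     return best
-- ===== Notes on version B (the rewrite author's own statement) =====
-- stated objective: faster
-- what changed: Replaces the O(n^3) scan of all substrings, each tested by comparing len(str(set(...))), with a per-start incremental scan that grows a seen-set and stops at the first index covering all distinct characters.
-- intended difference: On strings with a single distinct ordinary character A returns 0 (the empty substring passes its repr-length set test), and on strings whose every shortest all-distinct-covering window must include the last character A returns a longer length (its substring end index stops at n-1, so such windows are never examined); B returns the true length of the shortest substring containing all distinct characters, which is the intended value. — e.g. on small_substring_calculate("a"): A returns 0, B returns 1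
import Mathlib
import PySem

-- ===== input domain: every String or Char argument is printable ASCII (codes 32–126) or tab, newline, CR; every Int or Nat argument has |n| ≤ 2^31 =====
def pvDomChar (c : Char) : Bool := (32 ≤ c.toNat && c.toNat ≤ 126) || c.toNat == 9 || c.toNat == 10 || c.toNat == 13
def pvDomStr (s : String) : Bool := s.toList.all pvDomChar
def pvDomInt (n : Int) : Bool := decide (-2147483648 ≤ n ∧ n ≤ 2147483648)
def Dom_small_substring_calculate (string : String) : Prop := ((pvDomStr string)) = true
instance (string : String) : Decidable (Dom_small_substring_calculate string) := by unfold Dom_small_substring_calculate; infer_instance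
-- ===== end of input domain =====

-- B replaces A's O(n^3) scan of all substrings (each tested by the length of str(set(...)))
-- with a per-start incremental scan that stops at the first covering end index; where A's
-- value is an artefact of its bounds (see D_ below) B returns the intended shortest length.

-- ===== PORT A =====
-- len(repr(c)) for a single character, exact on Dom (printable ASCII plus tab/newline/CR):
-- backslash/tab/newline/CR render as '\x' (4 chars), every other Dom char as 'c' (3 chars;
-- the apostrophe renders in double quotes, also 3 chars).
def pyCharReprLen (c : Char) : Nat :=
  if c = '\\' ∨ c = '\t' ∨ c = '\n' ∨ c = '\r' then 4 else 3

-- len(str(k)) for a set of characters k.  str(set()) = "set()" has length 5; otherwise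
-- 2 braces + each element's repr + ", " between consecutive elements.  Hand-ported
-- (str(set) is not a PySem primitive); Python's set iteration order is not modelled, but the
-- LENGTH, which is all A ever uses, is independent of it, so this is exact on Dom.
def pySetReprLen (k : PySem.Set Char) : Nat :=
  if k = [] then 5 else 2 + (k.map pyCharReprLen).sum + 2 * (k.length - 1)

def find_distinct_chars (string : String) (n : Int) : Int :=
  let k := PySem.Set.ofList (PySem.List.slice string.toList (some 0) (some n))
  ((pySetReprLen k : Int))

def small_substring_calculate (string : String) : Int :=
  let s := string.toList
  let n : Int := (s.length : Int)
  let max_distinct_chars := find_distinct_chars string n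
  (PySem.List.pyRange 0 n 1).foldl (fun res i =>
    (PySem.List.pyRange 0 n 1).foldl (fun res j =>
      let substring := PySem.List.slice s (some i) (some j)
      let substring_length : Int := (substring.length : Int)
      let d := find_distinct_chars (String.ofList substring) substring_length
      if substring_length < res ∧ max_distinct_chars = d then substring_length else res)
      res) n

-- ===== PORT B =====
-- inner loop of Source B: scan j over the remaining indices, growing the seen-set; at the first j
-- whose window covers every distinct char, update best and break.  string[j] is in range for
-- every generated j, so getD is exact here.
def pvAltInner (s : List Char) (dlen : Nat) (i : Nat) (js : List Nat)
    (seen : PySem.Set Char) (best : Int) : Int :=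
  match js with
  | [] => best
  | j :: rest =>
    let seen' := PySem.Set.add seen (s.getD j ' ')
    if seen'.length = dlen then min best ((j : Int) - (i : Int) + 1)
    else pvAltInner s dlen i rest seen' best

def small_substring_calculate_alt (string : String) : Int :=
  let s := string.toList
  let n := s.length
  let distinct := (PySem.Set.ofList s).length
  (List.range n).foldl (fun best i =>
    pvAltInner s distinct i (List.range' i (n - i)) PySem.Set.empty best) (n : Int)

-- ===== PRECONDITION & SPEC =====
-- A is wrong on two kinds of inputs: strings with one distinct ordinary character (code not in
-- {92 backslash, 9 tab, 10 newline, 13 CR}; A's repr-length test lets the EMPTY substring match,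
-- so A returns 0 where the shortest substring has length 1), and strings where some
-- all-chars-covering suffix l.drop i is strictly shorter than every covering window avoiding the
-- last position (A's substring end index stops at n-1, so it never examines the windows reaching
-- the last character and returns a longer length); B returns the true shortest length there.
abbrev pvD (l : List Char) : Prop :=
  ((PySem.Set.ofList l).length = 1 ∧ ∀ c ∈ l, c.toNat ∉ [92, 9, 10, 13])
  ∨ ∃ i < l.length, i ≠ 0 ∧ l ⊆ l.drop i ∧ ∀ i' < i, ¬ l ⊆ (l.drop i').take (l.length - i)

def D_small_substring_calculate (string : String) : Prop := pvD string.toList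
instance (string : String) : Decidable (D_small_substring_calculate string) := by
  unfold D_small_substring_calculate; infer_instance

def Spec_small_substring_calculate (string : String) (out : Int) : Prop :=
  ¬ D_small_substring_calculate string → out = small_substring_calculate_alt string
instance (string : String) (out : Int) : Decidable (Spec_small_substring_calculate string out) := by
  unfold Spec_small_substring_calculate; infer_instance

def pvDiffWitness_small_substring_calculate : String := "a"
def pvDiffWitnessOut_small_substring_calculate : Int × Int := (0, 1)

-- ===== CLAIM (what is proved, stated in full; the proofs are below) =====
def Claim_unchanged_small_substring_calculate : Prop := ∀ (string : String), Dom_small_substring_calculate string → Spec_small_substring_calculate string (small_substring_calculate string)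
def Claim_changed_small_substring_calculate : Prop := Dom_small_substring_calculate (pvDiffWitness_small_substring_calculate) ∧ D_small_substring_calculate (pvDiffWitness_small_substring_calculate) ∧ small_substring_calculate (pvDiffWitness_small_substring_calculate) = pvDiffWitnessOut_small_substring_calculate.1 ∧ small_substring_calculate_alt (pvDiffWitness_small_substring_calculate) = pvDiffWitnessOut_small_substring_calculate.2 ∧ pvDiffWitnessOut_small_substring_calculate.1 ≠ pvDiffWitnessOut_small_substring_calculate.2
def Claim_exact_small_substring_calculate : Prop := ∀ (string : String), Dom_small_substring_calculate string → D_small_substring_calculate string → small_substring_calculate string ≠ small_substring_calculate_alt string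

-- ===== LEMMAS AND PROOFS =====

-- the window s[i:j] and the covering condition
def pvWin (s : List Char) (i j : Nat) : List Char := (s.drop i).take (j - i)
abbrev pvCover (s w : List Char) : Prop := ∀ c ∈ s, c ∈ w

lemma pvCharEq {c d : Char} (h : c.toNat = d.toNat) : c = d :=
  Char.ext (UInt32.toNat_inj.mp h)

lemma win_start (s : List Char) (i m : Nat) : pvWin s i (i + m) = (s.drop i).take m := by
  unfold pvWin
  congr 1
  omega

lemma win_mono (s : List Char) {i₀ i j j₀ : Nat} (h1 : i₀ ≤ i) (h2 : j ≤ j₀) :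
    pvWin s i j ⊆ pvWin s i₀ j₀ := by
  intro x hx
  unfold pvWin at hx ⊢
  obtain ⟨k, hk, hget⟩ := List.getElem_of_mem hx
  rw [List.length_take, List.length_drop] at hk
  have hk1 : k < j - i := lt_of_lt_of_le hk (min_le_left _ _)
  have hk2 : k < s.length - i := lt_of_lt_of_le hk (min_le_right _ _)
  rw [List.getElem_take, List.getElem_drop] at hget
  refine List.mem_iff_getElem.mpr ⟨i + k - i₀, ?_, ?_⟩
  · rw [List.length_take, List.length_drop]
    omega
  · rw [List.getElem_take, List.getElem_drop]
    refine Eq.trans ?_ hget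
    congr 1
    omega

-- repr-length of a nonempty set, additive form
def pvRl (l : List Char) : Nat := (l.map pyCharReprLen).sum + 2 * l.length

lemma pySetReprLen_eq_rl (l : List Char) (h : l ≠ []) : pySetReprLen l = pvRl l := by
  have : 1 ≤ l.length := List.length_pos_iff.mpr h
  simp only [pySetReprLen, pvRl, if_neg h]; omega

lemma three_le_reprLen (c : Char) : 3 ≤ pyCharReprLen c := by
  unfold pyCharReprLen; split <;> omega

lemma rl_ge (l : List Char) : 5 * l.length ≤ pvRl l := by
  induction l with
  | nil => simp [pvRl]
  | cons c t ih =>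
    have := three_le_reprLen c
    simp only [pvRl, List.map_cons, List.sum_cons, List.length_cons] at *
    omega

lemma rl_perm {u v : List Char} (h : u.Perm v) : pvRl u = pvRl v := by
  unfold pvRl
  rw [h.length_eq, (h.map pyCharReprLen).sum_eq]

lemma rl_strict {u v : List Char} (hu : u.Nodup) (hv : v.Nodup)
    (hsub : ∀ x ∈ u, x ∈ v) (hne : ∃ x ∈ v, x ∉ u) : pvRl u < pvRl v := by
  obtain ⟨u', hperm, hsl⟩ := (hu.subperm hsub)
  have hsum : ((u'.map pyCharReprLen).sum) ≤ (v.map pyCharReprLen).sum :=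
    (hsl.map pyCharReprLen).sum_le_sum (by intro x hx; positivity)
  have hlen : u'.length < v.length := by
    rcases lt_or_eq_of_le hsl.length_le with h | h
    · exact h
    · exfalso
      have := hsl.eq_of_length h
      obtain ⟨x, hxv, hxu⟩ := hne
      exact hxu (hperm.mem_iff.mp (this ▸ hxv))
  calc pvRl u = pvRl u' := (rl_perm hperm).symm
    _ < pvRl v := by unfold pvRl; omega

lemma rl_congr_members {u v : List Char} (hu : u.Nodup) (hv : v.Nodup)
    (h : ∀ x, x ∈ u ↔ x ∈ v) : pvRl u = pvRl v :=
  rl_perm ((List.perm_ext_iff_of_nodup hu hv).mpr h)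

lemma len_eq_iff_cover (s w : List Char) (hw : ∀ c ∈ w, c ∈ s) :
    (PySem.Set.ofList w).length = (PySem.Set.ofList s).length ↔ pvCover s w := by
  constructor
  · intro hlen c hc
    obtain ⟨u', hperm, hsl⟩ := (PySem.Set.nodup_ofList w).subperm
      (fun x hx => (PySem.Set.mem_ofList _ _).mpr (hw x ((PySem.Set.mem_ofList _ _).mp hx)))
    have : u' = PySem.Set.ofList s := hsl.eq_of_length (by rw [hperm.length_eq, hlen])
    have : c ∈ u' := this ▸ (PySem.Set.mem_ofList _ _).mpr hc
    exact (PySem.Set.mem_ofList _ _).mp (hperm.mem_iff.mp this)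
  · intro hcov
    exact List.Perm.length_eq <| (List.perm_ext_iff_of_nodup
      (PySem.Set.nodup_ofList _) (PySem.Set.nodup_ofList _)).mpr (by
        intro x; simp only [PySem.Set.mem_ofList _ _]
        exact ⟨fun h => hw x h, fun h => hcov x h⟩)

-- A's repr-length comparison characterised: quirk condition
def pvQuirk (s : List Char) : Prop :=
  (PySem.Set.ofList s).length = 1 ∧ PySem.Set.inter (PySem.Set.ofList s) ['\\', '\t', '\n', '\r'] = []

lemma rl_eq_five_iff (s : List Char) (hs : s ≠ []) :
    pvRl (PySem.Set.ofList s) = 5 ↔ pvQuirk s := by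
  constructor
  · intro h5
    have hlen : (PySem.Set.ofList s).length = 1 := by
      have hge := rl_ge (PySem.Set.ofList s)
      have hne : PySem.Set.ofList s ≠ [] := by
        simp only [ne_eq, List.eq_nil_iff_forall_not_mem]
        push_neg
        obtain ⟨c, hc⟩ := List.exists_mem_of_ne_nil s hs
        exact ⟨c, (PySem.Set.mem_ofList _ _).mpr hc⟩
      have : 1 ≤ (PySem.Set.ofList s).length := List.length_pos_iff.mpr hne
      omega
    obtain ⟨c, hc⟩ := List.length_eq_one_iff.mp hlen
    refine ⟨hlen, ?_⟩
    rw [List.eq_nil_iff_forall_not_mem]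
    intro x hx
    have hx1 := (PySem.Set.mem_inter _ _ x).mp hx
    rw [hc] at hx1 h5
    simp only [List.mem_singleton] at hx1
    simp only [pvRl, List.map_cons, List.map_nil, List.sum_cons, List.sum_nil, List.length_singleton] at h5
    have : pyCharReprLen c = 3 := by omega
    unfold pyCharReprLen at this
    rcases hx1 with ⟨hxc, hmem⟩
    subst hxc
    simp only [List.mem_cons, List.mem_singleton] at hmem
    split at this
    · omega
    · rename_i hn; exact hn (by tauto)
  · rintro ⟨hlen, hinter⟩
    obtain ⟨c, hc⟩ := List.length_eq_one_iff.mp hlen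
    rw [hc]
    have hcmem : c ∈ PySem.Set.ofList s := by rw [hc]; simp
    have : pyCharReprLen c = 3 := by
      unfold pyCharReprLen
      split
      · rename_i hsp
        exfalso
        have : c ∈ PySem.Set.inter (PySem.Set.ofList s) ['\\', '\t', '\n', '\r'] :=
          (PySem.Set.mem_inter _ _ _).mpr ⟨hcmem, by rcases hsp with h|h|h|h <;> simp [h]⟩
        rw [hinter] at this; exact absurd this (List.not_mem_nil)
      · rfl
    simp [pvRl, this]

-- Q characterisation: A's repr-length test on a member-subset w of s
lemma vlen_eq_iff (s w : List Char) (hw : ∀ c ∈ w, c ∈ s) :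
    pySetReprLen (PySem.Set.ofList s) = pySetReprLen (PySem.Set.ofList w)
      ↔ ((w = [] ∧ (s = [] ∨ pvQuirk s)) ∨ (w ≠ [] ∧ pvCover s w)) := by
  have ofne : ∀ (l : List Char), l ≠ [] → PySem.Set.ofList l ≠ [] := by
    intro l h
    obtain ⟨c, hc⟩ := List.exists_mem_of_ne_nil l h
    intro hnil
    have := (PySem.Set.mem_ofList l c).mpr hc
    rw [hnil] at this; exact absurd this (List.not_mem_nil)
  by_cases hs : s = []
  · subst hs
    have hwnil : w = [] := by
      cases w with
      | nil => rfl
      | cons c t => exact absurd (hw c (by simp)) (List.not_mem_nil)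
    subst hwnil
    constructor
    · intro _; exact Or.inl ⟨rfl, Or.inl rfl⟩
    · intro _; rfl
  · by_cases hwe : w = []
    · subst hwe
      have h5 : pySetReprLen (PySem.Set.ofList ([] : List Char)) = 5 := by decide
      rw [pySetReprLen_eq_rl _ (ofne s hs), h5]
      constructor
      · intro h
        exact Or.inl ⟨rfl, Or.inr ((rl_eq_five_iff s hs).mp h)⟩
      · rintro (⟨-, h | h⟩ | ⟨hne, -⟩)
        · exact absurd h hs
        · exact (rl_eq_five_iff s hs).mpr h
        · exact absurd rfl hne
    · rw [pySetReprLen_eq_rl _ (ofne s hs), pySetReprLen_eq_rl _ (ofne w hwe)]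
      constructor
      · intro h
        refine Or.inr ⟨hwe, ?_⟩
        by_contra hcov
        simp only [pvCover] at hcov
        push_neg at hcov
        obtain ⟨c, hcs, hcw⟩ := hcov
        have : pvRl (PySem.Set.ofList w) < pvRl (PySem.Set.ofList s) :=
          rl_strict (PySem.Set.nodup_ofList _) (PySem.Set.nodup_ofList _)
            (fun x hx => (PySem.Set.mem_ofList _ _).mpr (hw x ((PySem.Set.mem_ofList _ _).mp hx)))
            ⟨c, (PySem.Set.mem_ofList _ _).mpr hcs, fun hx => hcw ((PySem.Set.mem_ofList _ _).mp hx)⟩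
        omega
      · rintro (⟨h, -⟩ | ⟨-, hcov⟩)
        · exact absurd h hwe
        · exact (rl_congr_members (PySem.Set.nodup_ofList _) (PySem.Set.nodup_ofList _)
            (by intro x
                simp only [PySem.Set.mem_ofList _ _]
                exact ⟨fun h => hw x h, fun h => hcov x h⟩)).symm

-- ---- generic conditional-min fold machinery (over Int) ----
lemma foldl_if_lt_eq_min {α : Type} (P : α → Prop) [DecidablePred P] (f : α → Int) :
    ∀ (xs : List α) (r0 : Int),
      xs.foldl (fun r x => if f x < r ∧ P x then f x else r) r0
        = xs.foldl (fun r x => if P x then min r (f x) else r) r0 := by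
  intro xs
  induction xs with
  | nil => intro r0; rfl
  | cons x t ih =>
    intro r0
    simp only [List.foldl_cons]
    rw [ih]
    congr 1
    by_cases hp : P x
    · rw [if_pos hp]
      by_cases hlt : f x < r0
      · rw [if_pos (And.intro hlt hp)]; omega
      · rw [if_neg (fun hc => hlt hc.1)]; omega
    · rw [if_neg hp, if_neg (fun hc => hp hc.2)]

lemma mfold_le_init {α : Type} (P : α → Prop) [DecidablePred P] (f : α → Int) :
    ∀ (xs : List α) (r0 : Int),
      xs.foldl (fun r x => if P x then min r (f x) else r) r0 ≤ r0 := by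
  intro xs
  induction xs with
  | nil => intro r0; simp
  | cons x t ih =>
    intro r0
    simp only [List.foldl_cons]
    refine le_trans (ih _) ?_
    split <;> omega

lemma mfold_mono {α : Type} (P : α → Prop) [DecidablePred P] (f : α → Int) :
    ∀ (xs : List α) (r0 r1 : Int), r0 ≤ r1 →
      xs.foldl (fun r x => if P x then min r (f x) else r) r0
        ≤ xs.foldl (fun r x => if P x then min r (f x) else r) r1 := by
  intro xs
  induction xs with
  | nil => intro r0 r1 h; simpa
  | cons x t ih =>
    intro r0 r1 h
    simp only [List.foldl_cons]
    refine ih _ _ ?_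
    split <;> omega

lemma mfold_le_of_mem {α : Type} (P : α → Prop) [DecidablePred P] (f : α → Int) :
    ∀ (xs : List α) (r0 : Int) (x : α), x ∈ xs → P x →
      xs.foldl (fun r x => if P x then min r (f x) else r) r0 ≤ f x := by
  intro xs
  induction xs with
  | nil => intro r0 x h; exact absurd h (List.not_mem_nil)
  | cons y t ih =>
    intro r0 x hmem hp
    simp only [List.foldl_cons]
    rcases List.mem_cons.mp hmem with h | h
    · subst h
      refine le_trans (mfold_le_init _ _ _ _) ?_
      simp only [if_pos hp]; omega
    · exact ih _ x h hp

lemma mfold_cases {α : Type} (P : α → Prop) [DecidablePred P] (f : α → Int) :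
    ∀ (xs : List α) (r0 : Int),
      xs.foldl (fun r x => if P x then min r (f x) else r) r0 = r0
        ∨ ∃ x ∈ xs, P x ∧ xs.foldl (fun r x => if P x then min r (f x) else r) r0 = f x := by
  intro xs
  induction xs with
  | nil => intro r0; left; rfl
  | cons y t ih =>
    intro r0
    simp only [List.foldl_cons]
    by_cases hp : P y
    · simp only [if_pos hp]
      rcases ih (min r0 (f y)) with h | ⟨x, hx, hpx, hval⟩
      · by_cases hc : r0 ≤ f y
        · left; rw [h]; omega
        · right; exact ⟨y, by simp, hp, by rw [h]; omega⟩
      · right; exact ⟨x, by simp [hx], hpx, hval⟩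
    · simp only [if_neg hp]
      rcases ih r0 with h | ⟨x, hx, hpx, hval⟩
      · left; exact h
      · right; exact ⟨x, by simp [hx], hpx, hval⟩

abbrev pvQ (s : List Char) (i j : Nat) : Prop :=
  pySetReprLen (PySem.Set.ofList s) = pySetReprLen (PySem.Set.ofList (pvWin s i j))

lemma fdc_all (string : String) :
    find_distinct_chars string ((string.toList.length : Int))
      = (pySetReprLen (PySem.Set.ofList string.toList) : Int) := by
  unfold find_distinct_chars
  rw [PySem.List.slice_zero_start, PySem.List.slice_to_natCast, List.take_length]

lemma fdc_sub (w : List Char) :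
    find_distinct_chars (String.ofList w) ((w.length : Int))
      = (pySetReprLen (PySem.Set.ofList w) : Int) := by
  unfold find_distinct_chars
  simp only [PySem.List.slice_zero_start]
  rw [show (String.ofList w).toList = w from by simp]
  rw [PySem.List.slice_to_natCast, List.take_length]

def pvAF (s : List Char) : Int :=
  (List.range s.length).foldl (fun res i =>
    (List.range s.length).foldl (fun res j =>
      if pvQ s i j then min res ((pvWin s i j).length : Int) else res) res) (s.length : Int)

lemma A_char (string : String) : small_substring_calculate string = pvAF string.toList := by
  unfold small_substring_calculate pvAF
  simp only []
  rw [PySem.List.pyRange_zero_natCast, List.foldl_map]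
  refine List.foldl_ext _ _ _ ?_
  intro res i hi
  rw [List.foldl_map]
  refine Eq.trans (List.foldl_ext _
    (fun r j => if ((pvWin string.toList i j).length : Int) < r ∧ pvQ string.toList i j
      then ((pvWin string.toList i j).length : Int) else r) _ ?_)
    (foldl_if_lt_eq_min (fun j => pvQ string.toList i j)
      (fun j => ((pvWin string.toList i j).length : Int)) _ _)
  intro r j hj
  beta_reduce
  rw [PySem.List.slice_natCast, fdc_all, fdc_sub]
  have hwin : ((string.toList.drop i).take (j - i)) = pvWin string.toList i j := rfl
  rw [hwin]
  by_cases hq : pvQ string.toList i j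
  · by_cases hlt : ((pvWin string.toList i j).length : Int) < r
    · rw [if_pos ⟨hlt, by exact_mod_cast hq⟩, if_pos ⟨hlt, hq⟩]
    · rw [if_neg (fun h => hlt h.1), if_neg (fun h => hlt h.1)]
  · rw [if_neg (fun h => hq (Nat.cast_inj.mp h.2)), if_neg (fun h => hq h.2)]

-- ---- window basics ----
lemma win_subset (s : List Char) (i t : Nat) : ∀ c ∈ (s.drop i).take t, c ∈ s :=
  fun c hc => List.mem_of_mem_drop (List.mem_of_mem_take hc)

lemma win_length (s : List Char) (i j : Nat) (hj : j ≤ s.length) :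
    (pvWin s i j).length = j - i := by
  unfold pvWin
  rw [List.length_take, List.length_drop]
  omega

lemma cover_ne_nil {s w : List Char} (hs : s ≠ []) (hcov : pvCover s w) : w ≠ [] := by
  obtain ⟨c, hc⟩ := List.exists_mem_of_ne_nil s hs
  intro h
  subst h
  exact absurd (hcov c hc) (List.not_mem_nil)

lemma win_succ (body : List Char) (i j : Nat) (hij : i ≤ j) (hj : j < body.length) :
    (body.drop i).take (j + 1 - i) = (body.drop i).take (j - i) ++ [body[j]] := by
  have h1 : j + 1 - i = (j - i) + 1 := by omega
  rw [h1, List.take_succ]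
  congr 1
  rw [List.getElem?_drop]
  rw [show i + (j - i) = j from by omega]
  simp [List.getElem?_eq_getElem hj]

-- B's hit condition at end index j (inclusive)
abbrev pvC (s : List Char) (dlen i j : Nat) : Prop :=
  (PySem.Set.ofList ((s.drop i).take (j + 1 - i))).length = dlen

lemma altInner_le_best (s : List Char) (dlen i : Nat) :
    ∀ (js : List Nat) (seen : PySem.Set Char) (best : Int),
      pvAltInner s dlen i js seen best ≤ best := by
  intro js
  induction js with
  | nil => intro seen best; simp [pvAltInner]
  | cons j rest ih =>
    intro seen best
    simp only [pvAltInner]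
    split
    · omega
    · exact ih _ _

lemma altInner_mono (s : List Char) (dlen i : Nat) :
    ∀ (js : List Nat) (seen : PySem.Set Char) (b0 b1 : Int), b0 ≤ b1 →
      pvAltInner s dlen i js seen b0 ≤ pvAltInner s dlen i js seen b1 := by
  intro js
  induction js with
  | nil => intro seen b0 b1 h; simpa [pvAltInner]
  | cons j rest ih =>
    intro seen b0 b1 h
    simp only [pvAltInner]
    split
    · omega
    · exact ih _ _ _ h

lemma altInner_cases (s : List Char) (dlen i : Nat) :
    ∀ (k j : Nat) (best : Int), i ≤ j → j + k ≤ s.length →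
      pvAltInner s dlen i (List.range' j k) (PySem.Set.ofList ((s.drop i).take (j - i))) best = best
        ∨ ∃ jj, i ≤ jj ∧ jj < s.length ∧ pvC s dlen i jj ∧
            pvAltInner s dlen i (List.range' j k) (PySem.Set.ofList ((s.drop i).take (j - i))) best
              = (jj : Int) - (i : Int) + 1 := by
  intro k
  induction k with
  | zero => intro j best _ _; left; rfl
  | succ k ih =>
    intro j best hij hjk
    rw [List.range'_succ]
    simp only [pvAltInner]
    have hjlen : j < s.length := by omega
    have hseen : PySem.Set.add (PySem.Set.ofList ((s.drop i).take (j - i))) (s.getD j ' ')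
        = PySem.Set.ofList ((s.drop i).take (j + 1 - i)) := by
      rw [List.getD_eq_getElem s ' ' hjlen, win_succ s i j hij hjlen,
        PySem.Set.ofList_append_singleton]
    rw [hseen]
    by_cases hhit : (PySem.Set.ofList ((s.drop i).take (j + 1 - i))).length = dlen
    · rw [if_pos hhit]
      by_cases hlt : (j : Int) - (i : Int) + 1 < best
      · right
        exact ⟨j, hij, hjlen, hhit, by omega⟩
      · left; omega
    · rw [if_neg hhit]
      have := ih (j + 1) best (by omega) (by omega)
      rcases this with h | ⟨jj, h1, h2, h3, h4⟩
      · left; exact h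
      · right; exact ⟨jj, h1, h2, h3, h4⟩

lemma altInner_le_hit (s : List Char) (dlen i : Nat) :
    ∀ (k j : Nat) (best : Int) (jj : Nat), i ≤ j → j + k ≤ s.length →
      j ≤ jj → jj < j + k → pvC s dlen i jj →
      pvAltInner s dlen i (List.range' j k) (PySem.Set.ofList ((s.drop i).take (j - i))) best
        ≤ (jj : Int) - (i : Int) + 1 := by
  intro k
  induction k with
  | zero => intro j best jj _ _ _ h; omega
  | succ k ih =>
    intro j best jj hij hjk hjjj hjjk hc
    rw [List.range'_succ]
    simp only [pvAltInner]
    have hjlen : j < s.length := by omega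
    have hseen : PySem.Set.add (PySem.Set.ofList ((s.drop i).take (j - i))) (s.getD j ' ')
        = PySem.Set.ofList ((s.drop i).take (j + 1 - i)) := by
      rw [List.getD_eq_getElem s ' ' hjlen, win_succ s i j hij hjlen,
        PySem.Set.ofList_append_singleton]
    rw [hseen]
    by_cases hhit : (PySem.Set.ofList ((s.drop i).take (j + 1 - i))).length = dlen
    · rw [if_pos hhit]
      have : (j : Int) ≤ (jj : Int) := by exact_mod_cast hjjj
      omega
    · rw [if_neg hhit]
      have hne : jj ≠ j := by
        intro h; subst h; exact hhit hc
      exact ih (j + 1) best jj (by omega) (by omega) (by omega) (by omega) hc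

-- ---- generic outer-fold lemmas ----
lemma foldl_dec {α : Type} (g : Int → α → Int) (h : ∀ r x, g r x ≤ r) :
    ∀ (xs : List α) (r0 : Int), List.foldl g r0 xs ≤ r0 := by
  intro xs
  induction xs with
  | nil => intro r0; simp
  | cons x t ih => intro r0; exact le_trans (ih _) (h r0 x)

lemma foldl_le_of_mem {α : Type} (g : Int → α → Int)
    (hdec : ∀ r x, g r x ≤ r) (hmono : ∀ r0 r1 x, r0 ≤ r1 → g r0 x ≤ g r1 x)
    (x : α) (bound : Int) (hb : ∀ r, g r x ≤ bound) :
    ∀ (xs : List α) (r0 : Int), x ∈ xs → List.foldl g r0 xs ≤ bound := by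
  intro xs
  induction xs with
  | nil => intro r0 h; exact absurd h (List.not_mem_nil)
  | cons y t ih =>
    intro r0 hmem
    rcases List.mem_cons.mp hmem with h | h
    · subst h
      exact le_trans (foldl_dec g hdec t (g r0 x)) (hb r0)
    · exact ih _ h

lemma foldl_cases {α : Type} (g : Int → α → Int) (VP : α → Int → Prop)
    (hstep : ∀ r x, g r x = r ∨ ∃ v, VP x v ∧ g r x = v) :
    ∀ (xs : List α) (r0 : Int),
      List.foldl g r0 xs = r0 ∨ ∃ x ∈ xs, ∃ v, VP x v ∧ List.foldl g r0 xs = v := by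
  intro xs
  induction xs with
  | nil => intro r0; left; rfl
  | cons y t ih =>
    intro r0
    simp only [List.foldl_cons]
    rcases ih (g r0 y) with h | ⟨x, hx, v, hvp, hval⟩
    · rcases hstep r0 y with h2 | ⟨v, hvp, hval⟩
      · left; rw [h, h2]
      · right; exact ⟨y, by simp, v, hvp, by rw [h, hval]⟩
    · right; exact ⟨x, by simp [hx], v, hvp, hval⟩

-- ---- named form of B's fold ----
def pvBF (s : List Char) : Int :=
  (List.range s.length).foldl (fun best i =>
    pvAltInner s (PySem.Set.ofList s).length i
      (List.range' i (s.length - i)) PySem.Set.empty best) (s.length : Int)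

lemma B_char (string : String) : small_substring_calculate_alt string = pvBF string.toList := rfl

-- ---- AF facts ----
lemma AF_le_init (s : List Char) : pvAF s ≤ (s.length : Int) :=
  foldl_dec _ (fun r _ => mfold_le_init _ _ _ r) _ _

lemma AF_le (s : List Char) (i j : Nat) (hi : i < s.length) (hj : j < s.length)
    (hq : pvQ s i j) : pvAF s ≤ ((pvWin s i j).length : Int) := by
  refine foldl_le_of_mem _ (fun r _ => mfold_le_init _ _ _ r)
    (fun r0 r1 _ h => mfold_mono _ _ _ r0 r1 h) i _ ?_ _ _ (List.mem_range.mpr hi)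
  intro r
  exact mfold_le_of_mem _ _ _ r j (List.mem_range.mpr hj) hq

lemma AF_cases (s : List Char) : pvAF s = (s.length : Int)
    ∨ ∃ i, i < s.length ∧ ∃ j, j < s.length ∧ pvQ s i j
        ∧ pvAF s = ((pvWin s i j).length : Int) := by
  unfold pvAF
  have hstep : ∀ (r : Int) (i : Nat),
      (List.range s.length).foldl (fun res j =>
        if pvQ s i j then min res ((pvWin s i j).length : Int) else res) r = r
      ∨ ∃ v, (∃ j, j < s.length ∧ pvQ s i j ∧ v = ((pvWin s i j).length : Int))
          ∧ (List.range s.length).foldl (fun res j =>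
              if pvQ s i j then min res ((pvWin s i j).length : Int) else res) r = v := by
    intro r i
    rcases mfold_cases (fun j => pvQ s i j) (fun j => ((pvWin s i j).length : Int))
      (List.range s.length) r with h | ⟨j, hj, hq, hval⟩
    · left; exact h
    · right
      exact ⟨((pvWin s i j).length : Int), ⟨j, List.mem_range.mp hj, hq, rfl⟩, hval⟩
  rcases foldl_cases _
    (fun i v => ∃ j, j < s.length ∧ pvQ s i j ∧ v = ((pvWin s i j).length : Int))
    hstep (List.range s.length) (s.length : Int) with h | ⟨i, hi, v, ⟨j, hj, hq, hv⟩, hval⟩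
  · left; exact h
  · right; exact ⟨i, List.mem_range.mp hi, j, hj, hq, by rw [hval, hv]⟩

-- ---- BF facts ----
lemma seen_init (s : List Char) (i : Nat) :
    PySem.Set.empty = PySem.Set.ofList ((s.drop i).take (i - i)) := by
  rw [Nat.sub_self, List.take_zero]; rfl

lemma BF_le_init (s : List Char) : pvBF s ≤ (s.length : Int) :=
  foldl_dec _ (fun r i => altInner_le_best _ _ _ _ _ r) _ _

lemma BF_le (s : List Char) (i jj : Nat) (hij : i ≤ jj) (hjj : jj < s.length)
    (hc : pvC s (PySem.Set.ofList s).length i jj) :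
    pvBF s ≤ (jj : Int) - (i : Int) + 1 := by
  unfold pvBF
  refine foldl_le_of_mem (fun best i => pvAltInner s (PySem.Set.ofList s).length i
      (List.range' i (s.length - i)) PySem.Set.empty best)
    (fun r x => altInner_le_best _ _ _ _ _ r)
    (fun r0 r1 x h => altInner_mono _ _ _ _ _ r0 r1 h) i _ ?_ _ _
    (List.mem_range.mpr (lt_of_le_of_lt hij hjj))
  intro r
  rw [seen_init s i]
  exact altInner_le_hit _ _ _ _ _ r jj le_rfl (by omega) hij (by omega) hc

lemma BF_cases (s : List Char) : pvBF s = (s.length : Int)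
    ∨ ∃ i jj, i ≤ jj ∧ jj < s.length
        ∧ pvC s (PySem.Set.ofList s).length i jj
        ∧ pvBF s = (jj : Int) - (i : Int) + 1 := by
  unfold pvBF
  have hstep : ∀ (r : Int) (i : Nat),
      pvAltInner s (PySem.Set.ofList s).length i
        (List.range' i (s.length - i)) PySem.Set.empty r = r
      ∨ ∃ v, (∃ jj, i ≤ jj ∧ jj < s.length
            ∧ pvC s (PySem.Set.ofList s).length i jj ∧ v = (jj : Int) - (i : Int) + 1)
          ∧ pvAltInner s (PySem.Set.ofList s).length i
              (List.range' i (s.length - i)) PySem.Set.empty r = v := by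
    intro r i
    by_cases him : i ≤ s.length
    · rw [seen_init s i]
      rcases altInner_cases s (PySem.Set.ofList s).length i
        (s.length - i) i r le_rfl (by omega) with h | ⟨jj, h1, h2, h3, h4⟩
      · left; exact h
      · right; exact ⟨(jj : Int) - (i : Int) + 1, ⟨jj, h1, h2, h3, rfl⟩, h4⟩
    · left
      rw [show s.length - i = 0 from by omega]
      rfl
  rcases foldl_cases _
    (fun i v => ∃ jj, i ≤ jj ∧ jj < s.length
      ∧ pvC s (PySem.Set.ofList s).length i jj ∧ v = (jj : Int) - (i : Int) + 1)
    hstep (List.range s.length) (s.length : Int)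
    with h | ⟨i, hi, v, ⟨jj, h1, h2, h3, hv⟩, hval⟩
  · left; exact h
  · right; exact ⟨i, jj, h1, h2, h3, by rw [hval, hv]⟩

-- ---- bridges between the two hit conditions ----
lemma C_iff_cover (s : List Char) (i jj : Nat) :
    pvC s (PySem.Set.ofList s).length i jj ↔ pvCover s (pvWin s i (jj + 1)) := by
  unfold pvC pvWin
  exact len_eq_iff_cover s _ (win_subset s i _)

lemma Q_iff (s : List Char) (i j : Nat) :
    pvQ s i j ↔ ((pvWin s i j = [] ∧ (s = [] ∨ pvQuirk s))
      ∨ (pvWin s i j ≠ [] ∧ pvCover s (pvWin s i j))) :=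
  vlen_eq_iff s _ (win_subset s i _)

lemma all_eq_of_card_one {s : List Char} (h : (PySem.Set.ofList s).length = 1) :
    ∀ x ∈ s, ∀ y ∈ s, x = y := by
  obtain ⟨c, hc⟩ := List.length_eq_one_iff.mp h
  intro x hx y hy
  have hx' := (PySem.Set.mem_ofList s x).mpr hx
  have hy' := (PySem.Set.mem_ofList s y).mpr hy
  rw [hc] at hx' hy'
  simp only [List.mem_singleton] at hx' hy'
  rw [hx', hy']

lemma BF_pos (s : List Char) (hs : s ≠ []) : 1 ≤ pvBF s := by
  have hn : 1 ≤ s.length := List.length_pos_iff.mpr hs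
  rcases BF_cases s with h | ⟨i, jj, hij, hjj, _, h⟩
  · rw [h]; exact_mod_cast hn
  · rw [h]
    have : (i : Int) ≤ (jj : Int) := by exact_mod_cast hij
    omega

-- if d = 1 then the one-length window from 0 covers s
lemma cover_one {s : List Char} (hs : s ≠ []) (h1 : (PySem.Set.ofList s).length = 1) :
    pvCover s (pvWin s 0 1) := by
  intro c hc
  cases s with
  | nil => exact absurd rfl hs
  | cons a t =>
    have : c = a := all_eq_of_card_one h1 c hc a (by simp)
    simp [pvWin, this]

-- quirk is impossible when d ≥ 2
lemma not_quirk_of_two {s : List Char} (hd : 2 ≤ (PySem.Set.ofList s).length) : ¬ pvQuirk s := by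
  rintro ⟨h1, -⟩
  omega

-- a covering window is nonempty and i < j (when s ≠ [] and j ≤ n)
lemma win_full (s : List Char) (i : Nat) : pvWin s i s.length = s.drop i := by
  unfold pvWin
  apply List.take_of_length_le
  rw [List.length_drop]

lemma cover_win_pos {s : List Char} {i j : Nat} (hs : s ≠ []) (hj : j ≤ s.length)
    (hcov : pvCover s (pvWin s i j)) : i < j := by
  by_contra hle
  have : pvWin s i j = [] := by
    unfold pvWin
    rw [show j - i = 0 from by omega, List.take_zero]
  exact cover_ne_nil hs hcov this

-- ---- main agreement lemma ----
lemma AB_main (string : String) (hnD : ¬ D_small_substring_calculate string) :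
    small_substring_calculate string = small_substring_calculate_alt string := by
  rw [A_char, B_char]
  set s := string.toList with hsdef
  by_cases hnil : s = []
  · rw [hnil]; rfl
  have hn1 : 1 ≤ s.length := List.length_pos_iff.mpr hnil
  unfold D_small_substring_calculate pvD at hnD
  rw [← hsdef] at hnD
  push_neg at hnD
  obtain ⟨hq1, hq2⟩ := hnD
  by_cases hd1 : (PySem.Set.ofList s).length = 1
  · -- one distinct char; since ¬D it is an escape char, so the empty window never matches
    obtain ⟨c0, hc0, hc03⟩ := hq1 hd1
    simp only [List.mem_cons, List.not_mem_nil, or_false] at hc03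
    have hc0esc : c0 = '\\' ∨ c0 = '\t' ∨ c0 = '\n' ∨ c0 = '\r' := by
      rcases hc03 with h|h|h|h
      · exact Or.inl (pvCharEq h)
      · exact Or.inr (Or.inl (pvCharEq h))
      · exact Or.inr (Or.inr (Or.inl (pvCharEq h)))
      · exact Or.inr (Or.inr (Or.inr (pvCharEq h)))
    have hnoquirk : ¬ pvQuirk s := by
      rintro ⟨-, hinter⟩
      have : c0 ∈ PySem.Set.inter (PySem.Set.ofList s) ['\\', '\t', '\n', '\r'] :=
        (PySem.Set.mem_inter _ _ _).mpr ⟨(PySem.Set.mem_ofList _ _).mpr hc0,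
          by rcases hc0esc with h|h|h|h <;> simp [h]⟩
      rw [hinter] at this
      exact absurd this (List.not_mem_nil)
    -- B = 1
    have hBle : pvBF s ≤ 1 := by
      have hc : pvC s (PySem.Set.ofList s).length 0 0 :=
        (C_iff_cover s 0 0).mpr (cover_one hnil hd1)
      have := BF_le s 0 0 le_rfl (by omega) hc
      simpa using this
    have hB : pvBF s = 1 := le_antisymm hBle (BF_pos s hnil)
    -- A ≥ 1
    have hAge : 1 ≤ pvAF s := by
      rcases AF_cases s with h | ⟨i, hi, j, hj, hq, h⟩
      · rw [h]; exact_mod_cast hn1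
      · rcases (Q_iff s i j).mp hq with ⟨-, hcase⟩ | ⟨hne, -⟩
        · rcases hcase with h0 | h0
          · exact absurd h0 hnil
          · exact absurd h0 hnoquirk
        · rw [h]
          have : 1 ≤ (pvWin s i j).length := List.length_pos_iff.mpr hne
          exact_mod_cast this
    -- A ≤ 1
    have hAle : pvAF s ≤ 1 := by
      by_cases hn2 : 2 ≤ s.length
      · have hcov := cover_one hnil hd1
        have hq01 : pvQ s 0 1 := (Q_iff s 0 1).mpr
          (Or.inr ⟨cover_ne_nil hnil hcov, hcov⟩)
        have := AF_le s 0 1 (by omega) (by omega) hq01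
        rw [win_length s 0 1 (by omega)] at this
        simpa using this
      · have hl1 : s.length = 1 := by omega
        have hle := AF_le_init s
        rw [hl1] at hle
        simpa using hle
    rw [hB]
    omega
  · by_cases hd0 : (PySem.Set.ofList s).length = 0
    · -- impossible: s nonempty
      exfalso
      obtain ⟨c, hc⟩ := List.exists_mem_of_ne_nil s hnil
      have := (PySem.Set.mem_ofList s c).mpr hc
      rw [List.length_eq_zero_iff.mp hd0] at this
      exact absurd this (List.not_mem_nil)
    have hd2 : 2 ≤ (PySem.Set.ofList s).length := by omega
    have hnoquirk := not_quirk_of_two hd2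
    apply le_antisymm
    · -- A ≤ B
      rcases BF_cases s with h | ⟨i, jj, hij, hjj, hc, h⟩
      · rw [h]; exact AF_le_init s
      · rw [h]
        have hcov := (C_iff_cover s i jj).mp hc
        by_cases hlast : jj + 1 < s.length
        · have hq : pvQ s i (jj + 1) := (Q_iff s i (jj + 1)).mpr
            (Or.inr ⟨cover_ne_nil hnil hcov, hcov⟩)
          have := AF_le s i (jj + 1) (by omega) hlast hq
          rw [win_length s i (jj + 1) (by omega)] at this
          have hc1 : ((jj + 1 - i : Nat) : Int) = (jj : Int) - (i : Int) + 1 := by omega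
          rw [hc1] at this
          exact this
        · have hjjn : jj = s.length - 1 := by omega
          by_cases hi0 : i = 0
          · subst hi0
            calc pvAF s ≤ (s.length : Int) := AF_le_init s
              _ ≤ (jj : Int) - ((0 : Nat) : Int) + 1 := by push_cast; omega
          · -- i ≥ 1 and the suffix from i covers: ¬D gives a window avoiding the last
            -- position that is at most as long
            have hcovn : s ⊆ s.drop i := by
              intro c hcm
              have hcw := hcov c hcm
              rwa [show jj + 1 = s.length from by omega, win_full] at hcw
            obtain ⟨i', hi'lt, hsub'⟩ := hq2 i (by omega) hi0 hcovn
            have hcov' : pvCover s (pvWin s i' (i' + (s.length - i))) := by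
              rw [win_start]
              exact fun c hcm => hsub' hcm
            have hjlt : i' + (s.length - i) < s.length := by omega
            have hq' : pvQ s i' (i' + (s.length - i)) := (Q_iff s i' _).mpr
              (Or.inr ⟨cover_ne_nil hnil hcov', hcov'⟩)
            have hA := AF_le s i' (i' + (s.length - i)) (by omega) hjlt hq'
            rw [win_length s i' (i' + (s.length - i)) (by omega)] at hA
            have hc1 : ((i' + (s.length - i) - i' : Nat) : Int)
                = (jj : Int) - (i : Int) + 1 := by omega
            rw [hc1] at hA
            exact hA
    · -- B ≤ A
      rcases AF_cases s with h | ⟨i, hi, j, hj, hq, h⟩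
      · rw [h]; exact BF_le_init s
      · rcases (Q_iff s i j).mp hq with ⟨-, hcase⟩ | ⟨hne, hcov⟩
        · rcases hcase with h0 | h0
          · exact absurd h0 hnil
          · exact absurd h0 hnoquirk
        · have hiltj : i < j := cover_win_pos hnil (by omega) hcov
          have hc : pvC s (PySem.Set.ofList s).length i (j - 1) := by
            rw [C_iff_cover]
            rw [show j - 1 + 1 = j from by omega]
            exact hcov
          have := BF_le s i (j - 1) (by omega) (by omega) hc
          rw [h, win_length s i j (by omega)]
          have h1 : ((j - 1 : Nat) : Int) - (i : Int) + 1 = ((j - i : Nat) : Int) := by omega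
          rw [h1] at this
          exact this

-- ---- strict difference inside D ----
lemma ABne (string : String) (hD : D_small_substring_calculate string) :
    small_substring_calculate string ≠ small_substring_calculate_alt string := by
  rw [A_char, B_char]
  set s := string.toList with hsdef
  unfold D_small_substring_calculate pvD at hD
  rw [← hsdef] at hD
  rcases hD with ⟨hd1, hord⟩ | ⟨i, hi, hne0, hsub, hbeat⟩
  · -- quirk case: A = 0 < 1 ≤ B
    have hnil : s ≠ [] := by
      intro h
      rw [h] at hd1
      exact absurd hd1 (by decide)
    have hn1 : 1 ≤ s.length := List.length_pos_iff.mpr hnil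
    have hquirk : pvQuirk s := by
      refine ⟨hd1, ?_⟩
      rw [List.eq_nil_iff_forall_not_mem]
      intro x hx
      have hx1 := (PySem.Set.mem_inter _ _ x).mp hx
      have hxs := (PySem.Set.mem_ofList _ _).mp hx1.1
      have h3 := hord x hxs
      have hm := hx1.2
      simp only [List.mem_cons, List.not_mem_nil, or_false] at hm
      refine h3 ?_
      rcases hm with h|h|h|h <;> subst h <;> decide
    have hq00 : pvQ s 0 0 := (Q_iff s 0 0).mpr
      (Or.inl ⟨by simp [pvWin], Or.inr hquirk⟩)
    have hAle := AF_le s 0 0 (by omega) (by omega) hq00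
    have hwl : (pvWin s 0 0).length = 0 := by simp [pvWin]
    rw [hwl] at hAle
    have hB := BF_pos s hnil
    intro h
    rw [h] at hAle
    simp at hAle
    omega
  · -- forced-last-window case: B ≤ n - i < A
    have hnil : s ≠ [] := List.length_pos_iff.mp (by omega)
    have hcovn : pvCover s (s.drop i) := fun c hc => hsub hc
    have hc : pvC s (PySem.Set.ofList s).length i (s.length - 1) := by
      rw [C_iff_cover, show s.length - 1 + 1 = s.length from by omega, win_full]
      exact hcovn
    have hB := BF_le s i (s.length - 1) (by omega) (by omega) hc
    have hBn : pvBF s ≤ (s.length : Int) - (i : Int) := by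
      have h1 : ((s.length - 1 : Nat) : Int) - (i : Int) + 1
          = (s.length : Int) - (i : Int) := by omega
      rw [h1] at hB
      exact hB
    have hnoquirk : ¬ pvQuirk s := by
      rintro ⟨h1, -⟩
      have h01 := cover_one hnil h1
      refine hbeat 0 (by omega) ?_
      intro c hc
      have h2 := win_mono s (Nat.le_refl 0)
        (show (1 : Nat) ≤ 0 + (s.length - i) from by omega) (h01 c hc)
      rwa [win_start] at h2
    have hA : (s.length : Int) - (i : Int) < pvAF s := by
      rcases AF_cases s with h | ⟨i', hi', j', hj', hq, h⟩
      · rw [h]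
        have : (1 : Int) ≤ (i : Int) := by exact_mod_cast Nat.one_le_iff_ne_zero.mpr hne0
        omega
      · rcases (Q_iff s i' j').mp hq with ⟨-, hcase⟩ | ⟨hne, hcov⟩
        · rcases hcase with h0 | h0
          · exact absurd h0 hnil
          · exact absurd h0 hnoquirk
        · have hiltj : i' < j' := cover_win_pos hnil (by omega) hcov
          rw [h, win_length s i' j' (by omega)]
          by_contra hge
          have hlen : j' - i' ≤ s.length - i := by omega
          have hi0lt : min i' (i - 1) < i := by omega
          refine hbeat (min i' (i - 1)) hi0lt ?_
          intro c hcm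
          have h2 := win_mono s (show min i' (i - 1) ≤ i' from min_le_left _ _)
            (show j' ≤ min i' (i - 1) + (s.length - i) from by omega) (hcov c hcm)
          rwa [win_start] at h2
    omega

-- ===== VERDICT (by name: the statement is the Claim_ definition above) =====
theorem small_substring_calculate_spec : Claim_unchanged_small_substring_calculate := by
  intro string _
  unfold Spec_small_substring_calculate
  intro hnD
  exact AB_main string hnD

set_option maxRecDepth 4000 in
theorem small_substring_calculate_changed : Claim_changed_small_substring_calculate := by
  unfold Claim_changed_small_substring_calculate
  refine ⟨rfl, ?_, ?_, by decide, by decide⟩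
  · refine Or.inl ⟨rfl, ?_⟩
    intro c hc
    rw [show pvDiffWitness_small_substring_calculate.toList = ['a'] from rfl,
      List.mem_singleton] at hc
    subst hc
    decide
  · rw [show pvDiffWitness_small_substring_calculate = "a" from rfl, A_char "a"]
    decide

theorem small_substring_calculate_tight : Claim_exact_small_substring_calculate := by
  intro string _ hD
  exact ABne string hD
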